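-- pv_equiv track=rewrite | github.com/sirajhahmadnazeer123/Owlcoder | Find Players With Zero or One Losses.py | iteerate
-- ===== SOURCE A (Python) =====
-- def iteerate(li):
--     v=[]
--     b=[]
--     j=[]
--     d ={}
--     k={}
--     for i in range(len(li)):
--         if li[i][0] in d:
--             d[li[i][0]]+=1
--         else:
--             d[li[i][0]]=1
--     for i in range(len(li)):
--         if li[i][1] in k:
--             k[li[i][1]]+=1
--         else:
--             k[li[i][1]]=1
--     for i in d:
--         if i not in k:
--             v.append(i)
--     v.sort()
--     for i in k:
--         if k[i]==1:
--             b.append(i)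
--     b.sort()
--     j.append(v)
--     j.append(b)
--     return j
-- ===== SOURCE B (Python) =====
-- def iteerate(li):
--     winners = sorted({m[0] for m in li})
--     losers = sorted(m[1] for m in li)
--     loser_set = set(losers)
--     v = [p for p in winners if p not in loser_set]
--     b = []
--     i, n = 0, len(losers)
--     while i < n:
--         j = i + 1
--         while j < n and losers[j] == losers[i]:
--             j += 1
--         if j - i == 1:
--             b.append(losers[i])
--         i = j
--     return [v, b]
-- ===== Notes on version B (the rewrite author's own statement) =====
-- stated objective: alternative
-- what changed: Replaces A's hash-count dictionaries entirely by a sort-then-scan algorithm: sort the distinct winners and filter out anyone in the loser set, and sort the losers column and run-length scan it for runs of length exactly one (one-loss players), so no count table is ever built.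
-- outside the precondition, e.g. on iteerate([[1], [2, 3]]): A raises IndexError, B raises IndexError
import Mathlib
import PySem

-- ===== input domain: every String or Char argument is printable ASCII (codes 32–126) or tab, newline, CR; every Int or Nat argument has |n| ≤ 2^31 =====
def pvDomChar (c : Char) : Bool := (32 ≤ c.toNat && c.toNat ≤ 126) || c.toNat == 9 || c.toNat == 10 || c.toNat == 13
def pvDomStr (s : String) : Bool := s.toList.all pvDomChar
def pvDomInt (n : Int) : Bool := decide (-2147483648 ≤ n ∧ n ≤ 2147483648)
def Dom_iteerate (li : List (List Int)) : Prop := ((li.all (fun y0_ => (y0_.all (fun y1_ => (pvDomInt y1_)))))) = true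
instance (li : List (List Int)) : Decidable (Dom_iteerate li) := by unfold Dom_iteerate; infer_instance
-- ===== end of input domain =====

-- B replaces A's hash-count dictionaries by a sort-then-scan algorithm (sorted distinct winners
-- filtered against the loser set; run-length scan of the sorted loser column); objective: alternative.

-- ===== PORT A =====
def iteerate (li : List (List Int)) : List (List Int) :=
  let d : PySem.Dict Int Int := li.foldl (fun d x =>
      let w := (PySem.List.pyGet? x 0).getD 0
      if d.contains w then d.insert w (d.getD w 0 + 1) else d.insert w 1)
    PySem.Dict.empty
  let k : PySem.Dict Int Int := li.foldl (fun k x =>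
      let l := (PySem.List.pyGet? x 1).getD 0
      if k.contains l then k.insert l (k.getD l 0 + 1) else k.insert l 1)
    PySem.Dict.empty
  let v0 := d.keys.foldl (fun acc i => if !(k.contains i) then acc ++ [i] else acc) []
  let v := PySem.List.sorted v0 (fun x => x) false
  let b0 := k.keys.foldl (fun acc i => if k.getD i 0 == 1 then acc ++ [i] else acc) []
  let b := PySem.List.sorted b0 (fun x => x) false
  [v, b]

-- ===== PORT B =====
-- B's run-length scan over the sorted loser list: the inner while counting the run is the
-- takeWhile length, advancing i to j is dropping the run (losers[i:] is the remaining suffix).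
def pvUniqScan : List Int → List Int
  | [] => []
  | x :: t =>
    let k := (t.takeWhile (fun y => y == x)).length
    let rest := pvUniqScan (t.drop k)
    if k = 0 then x :: rest else rest
termination_by ls => ls.length
decreasing_by
  simp only [List.length_cons, List.length_drop]
  omega

def iteerate_alt (li : List (List Int)) : List (List Int) :=
  let winners := PySem.List.sorted
      (PySem.Set.ofList (li.map (fun m => (PySem.List.pyGet? m 0).getD 0))) (fun x => x) false
  let losers := PySem.List.sorted
      (li.map (fun m => (PySem.List.pyGet? m 1).getD 0)) (fun x => x) false
  let loserSet := PySem.Set.ofList losers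
  let v := winners.filter (fun p => !(PySem.Set.contains loserSet p))
  let b := pvUniqScan losers
  [v, b]

-- ===== PRECONDITION & SPEC =====
-- Pre_ excludes inputs containing a row with fewer than 2 entries: there the Python A raises IndexError on li[i][0]/li[i][1] (B raises too).
def Pre_iteerate (li : List (List Int)) : Prop := ∀ x ∈ li, 2 ≤ x.length
instance (li : List (List Int)) : Decidable (Pre_iteerate li) := by unfold Pre_iteerate; infer_instance
def pvWitness_iteerate : List (List Int) := [[1, 2], [3, 2], [1, 4]]
def Spec_iteerate (li : List (List Int)) (out : List (List Int)) : Prop := out = iteerate_alt li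
instance (li : List (List Int)) (out : List (List Int)) : Decidable (Spec_iteerate li out) := by unfold Spec_iteerate; infer_instance

-- ===== CLAIM (what is proved, stated in full; the proofs are below) =====
def Claim_equal_iteerate : Prop := ∀ (li : List (List Int)), Dom_iteerate li → Pre_iteerate li → Spec_iteerate li (iteerate li)

-- ===== LEMMAS AND PROOFS =====

def pvW (x : List Int) : Int := (PySem.List.pyGet? x 0).getD 0
def pvL (x : List Int) : Int := (PySem.List.pyGet? x 1).getD 0

-- A's counting loops are counters of the winner / loser columns
lemma countLoop_eq_counter (li : List (List Int)) (f : List Int → Int) :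
    li.foldl (fun d x =>
      if d.contains (f x) then d.insert (f x) (d.getD (f x) 0 + 1) else d.insert (f x) 1)
      (PySem.Dict.empty : PySem.Dict Int Int)
    = PySem.Dict.counter (li.map f) := by
  have hstep : (fun (d : PySem.Dict Int Int) x =>
      if d.contains (f x) then d.insert (f x) (d.getD (f x) 0 + 1) else d.insert (f x) 1)
      = fun d x => d.insert (f x) (d.getD (f x) 0 + 1) := by
    funext d x
    by_cases h : d.contains (f x) = true
    · simp [h]
    · have h0 : d.getD (f x) 0 = 0 :=
        PySem.Dict.getD_of_not_contains d 0 (by simpa using h)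
      simp [h, h0]
  rw [hstep, ← PySem.Dict.foldl_insert_getD_add_one_eq_counter (li.map f)]
  exact (List.foldl_map (f := f)
    (g := fun (d : PySem.Dict Int Int) w => d.insert w (d.getD w 0 + 1))).symm

-- drop past the takeWhile prefix is dropWhile
lemma pvDropTake (p : Int → Bool) : ∀ l : List Int, l.drop ((l.takeWhile p).length) = l.dropWhile p := by
  intro l
  induction l with
  | nil => simp
  | cons x t ih =>
    by_cases h : p x
    · simp [h, ih]
    · simp [h]

-- uniqScan stays inside its argument
lemma pvUniqScan_subset : ∀ (ls : List Int), ∀ p ∈ pvUniqScan ls, p ∈ ls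
  | [] => by simp [pvUniqScan]
  | x :: t => by
    intro p hp
    rw [pvUniqScan] at hp
    have hr := pvUniqScan_subset (t.drop ((t.takeWhile (fun y => y == x)).length)) p
    by_cases hk : (t.takeWhile (fun y => y == x)).length = 0
    · rw [if_pos hk] at hp
      rcases List.mem_cons.mp hp with h | h
      · simp [h]
      · exact List.mem_cons_of_mem _ (List.mem_of_mem_drop (hr h))
    · rw [if_neg hk] at hp
      exact List.mem_cons_of_mem _ (List.mem_of_mem_drop (hr hp))
termination_by ls => ls.length
decreasing_by simp only [List.length_cons, List.length_drop]; omega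

-- the key characterisation: on a sorted list, uniqScan returns exactly the elements of count 1,
-- in strictly increasing order
lemma pvUniqScan_sorted_char : ∀ (ls : List Int), ls.Pairwise (· ≤ ·) →
    (pvUniqScan ls).Pairwise (· < ·) ∧ ∀ p, (p ∈ pvUniqScan ls ↔ ls.count p = 1)
  | [] => by intro _; simp [pvUniqScan]
  | x :: t => by
    intro h
    have hx : ∀ y ∈ t, x ≤ y := fun y hy => (List.pairwise_cons.mp h).1 y hy
    have ht : t.Pairwise (· ≤ ·) := (List.pairwise_cons.mp h).2
    set kk := (t.takeWhile (fun y => y == x)).length with hkk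
    have hdw : t.drop kk = t.dropWhile (fun y => y == x) := pvDropTake _ t
    have hsplit : t.takeWhile (fun y => y == x) ++ t.drop kk = t := by
      rw [hdw, List.takeWhile_append_dropWhile]
    have htake : ∀ y ∈ t.takeWhile (fun y => y == x), y = x := by
      intro y hy
      have := List.mem_takeWhile_imp hy
      simpa using this
    have hdropgt : ∀ y ∈ t.drop kk, x < y := by
      rw [hdw]
      cases hD : t.dropWhile (fun y => y == x) with
      | nil => intro y hy; simp at hy
      | cons hHead r =>
        have hne : ¬ (hHead == x) = true := by
          have := List.head_dropWhile_not (p := fun y => y == x) (l := t) (by simp [hD])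
          simpa [hD] using this
        have hmemt : ∀ y ∈ hHead :: r, y ∈ t := by
          intro y hy
          have : y ∈ t.dropWhile (fun y => y == x) := by rw [hD]; exact hy
          exact List.Sublist.mem this (List.dropWhile_sublist _)
        have hHeadGt : x < hHead := by
          have hle := hx hHead (hmemt hHead (List.mem_cons_self))
          have : hHead ≠ x := by simpa using hne
          omega
        have hsortD : (hHead :: r).Pairwise (· ≤ ·) := by
          rw [← hD]
          exact ht.sublist (List.dropWhile_sublist _)
        intro y hy
        rcases List.mem_cons.mp hy with rfl | hy'
        · exact hHeadGt
        · have := (List.pairwise_cons.mp hsortD).1 y hy'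
          omega
    have hsortRest : (t.drop kk).Pairwise (· ≤ ·) := ht.sublist (List.drop_sublist _ _)
    obtain ⟨ihPw, ihMem⟩ := pvUniqScan_sorted_char (t.drop kk) hsortRest
    have hCountT : ∀ p : Int, t.count p = (t.takeWhile (fun y => y == x)).count p + (t.drop kk).count p := by
      intro p; rw [← List.count_append, hsplit]
    have hCountTakeX : (t.takeWhile (fun y => y == x)).count x = kk := by
      rw [hkk, List.count_eq_length.mpr]
      intro y hy; have := htake y hy; simp [this]
    have hCountTakeNe : ∀ p : Int, p ≠ x → (t.takeWhile (fun y => y == x)).count p = 0 := by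
      intro p hpx
      rw [List.count_eq_zero]
      intro hp; exact hpx (htake p hp)
    have hXnotDrop : (t.drop kk).count x = 0 := by
      rw [List.count_eq_zero]
      intro hc; exact absurd (hdropgt x hc) (lt_irrefl x)
    constructor
    · rw [pvUniqScan]
      by_cases hk0 : kk = 0
      · rw [if_pos hk0]
        refine List.pairwise_cons.mpr ⟨?_, ihPw⟩
        intro y hy
        exact hdropgt y (pvUniqScan_subset _ y hy)
      · rw [if_neg hk0]; exact ihPw
    · intro p
      rw [pvUniqScan]
      have hcount : (x :: t).count p =
          (if p = x then 1 else 0) + (t.takeWhile (fun y => y == x)).count p + (t.drop kk).count p := by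
        rw [List.count_cons, hCountT]
        by_cases hpx : p = x <;> simp [hpx] <;> omega
      by_cases hk0 : kk = 0
      · rw [if_pos hk0]
        constructor
        · intro hp
          rcases List.mem_cons.mp hp with rfl | hp'
          · rw [hcount, hCountTakeX, hXnotDrop, hk0]
            simp
          · have hgt := hdropgt p (pvUniqScan_subset _ p hp')
            have hpx : p ≠ x := by omega
            have := (ihMem p).mp hp'
            rw [hcount, hCountTakeNe p hpx, if_neg hpx]
            omega
        · intro hc
          by_cases hpx : p = x
          · subst hpx; exact List.mem_cons_self
          · rw [hcount, hCountTakeNe p hpx, if_neg hpx] at hc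
            exact List.mem_cons_of_mem _ ((ihMem p).mpr (by omega))
      · rw [if_neg hk0]
        constructor
        · intro hp
          have hgt := hdropgt p (pvUniqScan_subset _ p hp)
          have hpx : p ≠ x := by omega
          have := (ihMem p).mp hp
          rw [hcount, hCountTakeNe p hpx, if_neg hpx]
          omega
        · intro hc
          by_cases hpx : p = x
          · subst hpx
            rw [hcount, hCountTakeX, hXnotDrop, if_pos rfl] at hc
            omega
          · rw [hcount, hCountTakeNe p hpx, if_neg hpx] at hc
            exact (ihMem p).mpr (by omega)
termination_by ls => ls.length
decreasing_by simp only [List.length_cons, List.length_drop]; omega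

-- ===== VERDICT (by name: the statement is the Claim_ definition above) =====
theorem iteerate_spec : Claim_equal_iteerate := by
  intro li _ _
  unfold Spec_iteerate
  simp only [iteerate, iteerate_alt]
  rw [countLoop_eq_counter li (fun x => (PySem.List.pyGet? x 0).getD 0),
    countLoop_eq_counter li (fun x => (PySem.List.pyGet? x 1).getD 0)]
  set ws := li.map (fun x => (PySem.List.pyGet? x 0).getD 0) with hws
  set ls := li.map (fun x => (PySem.List.pyGet? x 1).getD 0) with hls
  -- A's accumulation loops are filters over the (Nodup) key lists
  rw [PySem.List.foldl_append_if_eq_filter, PySem.List.foldl_append_if_eq_filter,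
    List.nil_append, List.nil_append, PySem.Dict.keys_counter, PySem.Dict.keys_counter]
  -- the v component
  have hsortedLs : (PySem.List.sorted ls (fun x => x) false).Pairwise (· ≤ ·) :=
    PySem.List.sorted_pairwise ls (fun x => x)
  have hpermLs : (PySem.List.sorted ls (fun x => x) false).Perm ls :=
    PySem.List.sorted_perm ls (fun x => x) false
  have hmemLs : ∀ p, p ∈ PySem.List.sorted ls (fun x => x) false ↔ p ∈ ls := fun p =>
    hpermLs.mem_iff
  have hv : PySem.List.sorted
        ((PySem.Set.ofList ws).filter (fun i => !(PySem.Dict.counter ls).contains i))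
        (fun x => x) false
      = (PySem.List.sorted (PySem.Set.ofList ws) (fun x => x) false).filter
          (fun p => !(PySem.Set.contains (PySem.Set.ofList (PySem.List.sorted ls (fun x => x) false)) p)) := by
    apply PySem.List.sorted_eq_of_perm_of_pairwise_lt
    · have hfeq : ∀ p : Int,
          ((fun p => !(PySem.Set.contains (PySem.Set.ofList (PySem.List.sorted ls (fun x => x) false)) p)) p)
          = ((fun i => !(PySem.Dict.counter ls).contains i) p) := by
        intro p
        simp only [PySem.Dict.contains_counter]
        simp [PySem.Set.contains, PySem.Set.mem_ofList, hmemLs p, List.contains_eq_mem]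
      rw [List.filter_congr (fun p _ => hfeq p)]
      exact ((PySem.List.sorted_perm _ _ _).filter _)
    · exact (PySem.List.sorted_ofList_pairwise_lt ws).filter _
  rw [hv]
  -- the b component
  have hchar := pvUniqScan_sorted_char (PySem.List.sorted ls (fun x => x) false) hsortedLs
  have hb : PySem.List.sorted
        ((PySem.Set.ofList ls).filter (fun i => (PySem.Dict.counter ls).getD i 0 == 1))
        (fun x => x) false
      = pvUniqScan (PySem.List.sorted ls (fun x => x) false) := by
    apply PySem.List.sorted_eq_of_perm_of_pairwise_lt
    · have hnodupScan : (pvUniqScan (PySem.List.sorted ls (fun x => x) false)).Nodup :=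
        List.Pairwise.imp (fun hlt => ne_of_lt hlt) hchar.1
      have hnodupFilter : ((PySem.Set.ofList ls).filter
          (fun i => (PySem.Dict.counter ls).getD i 0 == 1)).Nodup :=
        (PySem.Set.nodup_ofList ls).filter _
      rw [List.perm_ext_iff_of_nodup hnodupScan hnodupFilter]
      intro p
      rw [hchar.2 p, List.mem_filter]
      simp only [PySem.Set.mem_ofList, PySem.Dict.getD_counter, beq_iff_eq]
      rw [hpermLs.count_eq]
      constructor
      · intro hc
        have hp : p ∈ ls := List.count_pos_iff.mp (by omega)
        exact ⟨hp, by exact_mod_cast hc⟩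
      · rintro ⟨_, hc⟩
        exact_mod_cast hc
    · exact hchar.1
  rw [hb]
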